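-- pv_equiv track=rewrite | github.com/elastic/enterprise-search-microsoft-teams-connector | ees_microsoft_teams/utils.py | split_list_into_buckets
-- ===== SOURCE A (Python) =====
-- def split_list_into_buckets(object_list, total_groups):
--     """ Divides the list in groups of approximately equal sizes
--         :param object_list: List to be partitioned
--         :param total_groups: Number of groups to be formed
--     """
--     if object_list:
--         groups = min(total_groups, len(object_list))
--         group_list = []
--         for i in range(groups):
--             group_list.append(object_list[i::groups])
--         return group_list
--     else:
--         return []
-- ===== SOURCE B (Python) =====
-- def split_list_into_buckets(object_list, total_groups):
--     """Divides the list in groups of approximately equal sizes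
--        (round-robin distribution in a single pass)."""
--     if not object_list:
--         return []
--     groups = min(total_groups, len(object_list))
--     if groups <= 0:
--         return []
--     buckets = [[] for _ in range(groups)]
--     for idx, item in enumerate(object_list):
--         buckets[idx % groups].append(item)
--     return buckets
-- ===== Notes on version B (the rewrite author's own statement) =====
-- stated objective: simpler
-- what changed: Replaces per-group strided slicing (one slice pass per group) by a single round-robin pass that appends each element to bucket idx % groups.
import Mathlib
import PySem

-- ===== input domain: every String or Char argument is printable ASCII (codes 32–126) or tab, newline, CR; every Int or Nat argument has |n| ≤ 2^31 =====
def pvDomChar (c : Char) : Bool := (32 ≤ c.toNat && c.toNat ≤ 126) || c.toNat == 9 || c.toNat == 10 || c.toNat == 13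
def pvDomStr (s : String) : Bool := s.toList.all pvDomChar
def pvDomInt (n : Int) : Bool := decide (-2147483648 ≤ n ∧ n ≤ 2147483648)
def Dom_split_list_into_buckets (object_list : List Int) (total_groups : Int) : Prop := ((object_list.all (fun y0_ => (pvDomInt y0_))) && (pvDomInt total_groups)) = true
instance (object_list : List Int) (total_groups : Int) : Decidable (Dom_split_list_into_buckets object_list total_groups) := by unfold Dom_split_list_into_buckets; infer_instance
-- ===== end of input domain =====

-- B replaces A's per-group strided slicing by a single round-robin pass over the list (simpler decomposition, same result).

-- ===== PORT A =====
def split_list_into_buckets (object_list : List Int) (total_groups : Int) : List (List Int) :=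
  if object_list ≠ [] then
    let groups := min total_groups (PySem.List.len object_list)
    -- `object_list[i::groups]`: inside the loop i ∈ range(groups), so groups ≥ 1 and slice? never returns none; getD [] is unreachable
    (PySem.List.pyRange 0 groups 1).foldl
      (fun group_list i =>
        group_list ++ [(PySem.List.slice? object_list (some i) none groups).getD []]) []
  else []

-- ===== PORT B =====
def split_list_into_buckets_alt (object_list : List Int) (total_groups : Int) : List (List Int) :=
  if object_list = [] then []
  else
    let groups := min total_groups (PySem.List.len object_list)
    if groups ≤ 0 then []
    else
      (PySem.List.enumerate object_list 0).foldl
        (fun bks p => bks.modify (PySem.Int.mod p.1 groups).toNat (fun b => b ++ [p.2]))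
        (List.replicate groups.toNat ([] : List Int))

-- ===== PRECONDITION & SPEC =====
def Spec_split_list_into_buckets (object_list : List Int) (total_groups : Int) (out : List (List Int)) : Prop := out = split_list_into_buckets_alt object_list total_groups
instance (object_list : List Int) (total_groups : Int) (out : List (List Int)) : Decidable (Spec_split_list_into_buckets object_list total_groups out) := by unfold Spec_split_list_into_buckets; infer_instance

-- ===== CLAIM (what is proved, stated in full; the proofs are below) =====
def Claim_equal_split_list_into_buckets : Prop := ∀ (object_list : List Int) (total_groups : Int), Dom_split_list_into_buckets object_list total_groups → Spec_split_list_into_buckets object_list total_groups (split_list_into_buckets object_list total_groups)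

-- ===== LEMMAS AND PROOFS =====

-- every m-th element of a list, starting at its head
def strideL (m : Nat) : List Int → List Int
  | [] => []
  | y :: t => y :: strideL m (t.drop (m-1))
termination_by l => l.length
decreasing_by simp only [List.length_drop, List.length_cons]; omega

lemma strideL_nil (m : Nat) : strideL m [] = [] := by rw [strideL]

lemma strideL_cons (m : Nat) (y : Int) (t : List Int) :
    strideL m (y :: t) = y :: strideL m (t.drop (m-1)) := by rw [strideL]

-- elements of a list whose running counter (starting at c) is ≡ j (mod m)
def pickC (m j : Nat) : List Int → Nat → List Int
  | [], _ => []
  | x :: t, c => (if c % m = j then [x] else []) ++ pickC m j t (c+1)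

lemma pickC_skip (m j : Nat) : ∀ (d : Nat) (t : List Int) (c : Nat),
    (∀ e, e < d → (c + e) % m ≠ j) → pickC m j t c = pickC m j (t.drop d) (c + d) := by
  intro d
  induction d with
  | zero => intro t c _; simp
  | succ d ih =>
    intro t c h
    cases t with
    | nil => simp [pickC]
    | cons x t' =>
      have h0 : c % m ≠ j := by simpa using h 0 (by omega)
      simp only [pickC, if_neg h0, List.nil_append, List.drop_succ_cons]
      rw [ih t' (c+1) (fun e he => by
        have := h (e+1) (by omega); rwa [show c + (e+1) = c + 1 + e by omega] at this)]
      congr 1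
      omega

lemma pickC_eq_strideL (m j : Nat) (hm : 0 < m) : ∀ (t : List Int) (c : Nat),
    c % m = j → pickC m j t c = strideL m t
  | [], c, _ => by simp [pickC, strideL_nil]
  | y :: t', c, hc => by
    rw [strideL_cons]
    simp only [pickC, if_pos hc, List.singleton_append]
    congr 1
    rw [pickC_skip m j (m-1) t' (c+1) (fun e he => by
      intro hmod
      have h1 : (c + (1+e)) % m = c % m := by
        rw [show c + (1+e) = c+1+e by omega, hmod, hc]
      have h2 : c ≤ c + (1+e) := by omega
      have h3 : m ∣ (c + (1+e)) - c := (Nat.modEq_iff_dvd' h2).mp h1.symm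
      have h4 : m ≤ (c + (1+e)) - c := Nat.le_of_dvd (by omega) h3
      omega)]
    rw [show c + 1 + (m-1) = c + m by omega]
    exact pickC_eq_strideL m j hm (t'.drop (m-1)) (c+m) ((Nat.add_mod_right c m).trans hc)
termination_by t _ _ => t.length
decreasing_by simp only [List.length_drop, List.length_cons]; omega

lemma filterMap_stride (m : Nat) (hm : 0 < m) : ∀ (c : Nat) (ys : List Int),
    ys.length ≤ m * c →
    (List.range c).filterMap (fun k => ys[m*k]?) = strideL m ys := by
  intro c
  induction c with
  | zero =>
    intro ys h
    have : ys = [] := by cases ys <;> simp_all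
    simp [this, strideL_nil]
  | succ c ih =>
    intro ys h
    cases ys with
    | nil => simp [strideL_nil]
    | cons y t =>
      rw [List.range_succ_eq_map]
      simp only [List.filterMap_cons, Nat.mul_zero, List.getElem?_cons_zero, List.filterMap_map]
      have hfun : ((fun k => (y :: t)[m*k]?) ∘ Nat.succ) = fun k : Nat => (t.drop (m-1))[m*k]? := by
        funext k
        simp only [Function.comp]
        rw [List.getElem?_drop]
        rw [show m * Nat.succ k = (m - 1 + m*k) + 1 from by rw [Nat.mul_succ]; omega]
        rw [List.getElem?_cons_succ]
      rw [hfun, ih (t.drop (m-1)) (by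
        simp only [List.length_drop]
        simp only [List.length_cons] at h
        rw [Nat.mul_succ] at h
        omega)]
      rw [strideL_cons]

lemma slice_eq_filterMap (xs : List Int) (j m : Nat) (hm : 0 < m) (hj : j < m)
    (hlen : m ≤ xs.length) :
    PySem.List.slice? xs (some (j:Int)) none (m:Int)
      = some ((List.range ((xs.length - j + (m-1)) / m)).filterMap
          (fun k => xs[j + m*k]?)) := by
  rw [PySem.List.slice?]
  rw [if_neg (by positivity)]
  rw [PySem.List.sliceIndices]
  have hms : ¬ ((m:Int) < 0) := by omega
  have hj0 : ¬ ((j:Int) < 0) := by omega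
  simp only [if_neg hms, if_neg hj0]
  have hmin : min (j:Int) (xs.length:Int) = (j:Int) := by omega
  rw [hmin]
  rw [if_pos (by omega : (0:Int) < (m:Int)), if_pos (by omega : (j:Int) < (xs.length:Int))]
  have hc : ((xs.length:Int) - (j:Int) + (m:Int) - 1) = ((xs.length - j + (m-1) : Nat) : Int) := by
    push_cast; omega
  rw [hc, ← Int.natCast_div, Int.toNat_natCast]
  congr 1

-- A's bucket j is the stride of the list dropped by j
lemma slice_getD_eq_strideL (xs : List Int) (j m : Nat) (hm : 0 < m) (hj : j < m)
    (hlen : m ≤ xs.length) :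
    (PySem.List.slice? xs (some (j:Int)) none (m:Int)).getD [] = strideL m (xs.drop j) := by
  rw [slice_eq_filterMap xs j m hm hj hlen, Option.getD_some]
  have hfun : (fun k : Nat => xs[j + m*k]?) = fun k : Nat => (xs.drop j)[m*k]? := by
    funext k
    rw [List.getElem?_drop]
  rw [hfun]
  apply filterMap_stride m hm
  have h1 := Nat.div_add_mod (xs.length - j + (m-1)) m
  have h2 := Nat.mod_lt (xs.length - j + (m-1)) hm
  simp only [List.length_drop]
  omega

lemma modify_map_range (m i : Nat) (f : Nat → List Int) (g : List Int → List Int) :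
    ((List.range m).map f).modify i g
      = (List.range m).map (fun j => if j = i then g (f j) else f j) := by
  apply List.ext_getElem?
  intro n
  rw [List.getElem?_modify]
  by_cases hn : n < m
  · simp only [List.getElem?_map, List.getElem?_range hn, Option.map_some]
    by_cases hni : i = n
    · simp [hni]
    · simp [hni, Ne.symm hni]
  · have : (List.range m)[n]? = none := by
      simp; omega
    simp [this]

-- the round-robin loop appends pickC to every bucket
lemma rr_loop (m : Nat) : ∀ (xs : List Int) (k : Nat) (f : Nat → List Int),
    (PySem.List.enumerate xs (k : Int)).foldl
      (fun bks p => bks.modify (PySem.Int.mod p.1 (m : Int)).toNat (fun b => b ++ [p.2]))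
      ((List.range m).map f)
    = (List.range m).map (fun j => f j ++ pickC m j xs k) := by
  intro xs
  induction xs with
  | nil => intro k f; simp [PySem.List.enumerate_nil, pickC]
  | cons x t ih =>
    intro k f
    rw [PySem.List.enumerate_cons]
    simp only [List.foldl_cons]
    have hmod : (PySem.Int.mod (k : Int) (m : Int)).toNat = k % m := by
      rw [PySem.Int.mod_natCast, Int.toNat_natCast]
    rw [hmod, modify_map_range]
    have hk1 : ((k : Int) + 1) = ((k+1 : Nat) : Int) := by push_cast; ring
    rw [hk1, ih (k+1)]
    apply List.map_congr_left
    intro j hj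
    simp only [pickC]
    by_cases hcase : j = k % m
    · rw [if_pos hcase, if_pos (by omega)]
      simp
    · rw [if_neg hcase, if_neg (by omega)]
      simp

-- B's bucket j equals the stride of the list dropped by j
lemma pickC_zero_eq_strideL (m j : Nat) (hm : 0 < m) (hj : j < m) (xs : List Int) :
    pickC m j xs 0 = strideL m (xs.drop j) := by
  rw [pickC_skip m j j xs 0 (fun e he => by
    rw [Nat.zero_add, Nat.mod_eq_of_lt (by omega)]; omega)]
  rw [Nat.zero_add]
  exact pickC_eq_strideL m j hm (xs.drop j) j (Nat.mod_eq_of_lt hj)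

-- ===== VERDICT (by name: the statement is the Claim_ definition above) =====
theorem split_list_into_buckets_spec : Claim_equal_split_list_into_buckets := by
  unfold Claim_equal_split_list_into_buckets Spec_split_list_into_buckets
  intro xs g _
  by_cases hx : xs = []
  · simp [split_list_into_buckets, split_list_into_buckets_alt, hx]
  · rw [split_list_into_buckets, split_list_into_buckets_alt, if_pos hx, if_neg (by exact hx)]
    simp only
    set groups := min g (PySem.List.len xs) with hgr
    by_cases hg : groups ≤ 0
    · rw [if_pos hg, PySem.List.pyRange_one_eq_nil (by omega), List.foldl_nil]
    · rw [if_neg hg]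
      rw [not_le] at hg
      set m := groups.toNat with hmdef
      have hm : 0 < m := by omega
      have hgm : groups = (m : Int) := by omega
      have hlenx : PySem.List.len xs = (xs.length : Int) := PySem.List.len_eq xs
      have hmle : m ≤ xs.length := by
        have : groups ≤ (xs.length : Int) := by rw [hgr]; rw [hlenx] at hgr ⊢; exact min_le_right _ _
        omega
      -- A side: foldl-append is a map over range m
      rw [PySem.List.foldl_append_singleton_eq_map]
      rw [PySem.List.pyRange_one]
      rw [List.map_map]
      have hsub : ((groups - 0).toNat) = m := by omega
      rw [hsub]
      -- B side: initial buckets as a map over range m, then the loop lemma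
      have hrepl : List.replicate m ([] : List Int) = (List.range m).map (fun _ => []) := by
        rw [List.map_const']; rw [List.length_range]
      have hzero : (0 : Int) = ((0 : Nat) : Int) := by norm_num
      rw [hgm, hrepl, hzero, rr_loop m xs 0 (fun _ => [])]
      apply List.map_congr_left
      intro k hk
      simp only [Function.comp, List.mem_range] at hk ⊢
      rw [List.nil_append, pickC_zero_eq_strideL m k hm hk xs]
      rw [show ((0:Nat) : Int) + (k : Nat) = ((k : Nat) : Int) by norm_num]
      exact slice_getD_eq_strideL xs k m hm hk hmle
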